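-- pv_equiv track=rewrite | github.com/IES-Rafael-Alberti/dawb1-2425-ejercicios-u2-PabloFdez06 | src/ej22_8.py | crear_piramide
-- ===== SOURCE A (Python) =====
-- def crear_piramide(numero):
--
--     resto = (numero % 2)
--     i = None
--
--     piramide = ""
--     secuencia = ""
--     if resto == 0:
--         for i in range(0, numero + 1,2):
--             secuencia = str(i) + " " + secuencia
--             piramide = piramide + secuencia + "\n"
--
--     else:
--         for i in range(1, numero + 1,2):
--             secuencia = str(i) + " " + secuencia
--             piramide = piramide + secuencia + "\n"
--
--     return piramide
-- ===== SOURCE B (Python) =====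
-- def crear_piramide(numero):
--     inicio = 0 if numero % 2 == 0 else 1
--     numeros = list(range(inicio, numero + 1, 2))
--     lines = []
--     for k in range(1, len(numeros) + 1):
--         lines.append(''.join(str(x) + ' ' for x in reversed(numeros[:k])))
--     return ''.join(line + '\n' for line in lines)
-- ===== Notes on version B (the rewrite author's own statement) =====
-- stated objective: simpler
-- what changed: Replaces A's duplicated even/odd loops threading a growing 'secuencia' accumulator with a single precomputed list of the numbers, each pyramid line recomputed independently from a reversed prefix and the lines joined at the end.
import Mathlib
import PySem

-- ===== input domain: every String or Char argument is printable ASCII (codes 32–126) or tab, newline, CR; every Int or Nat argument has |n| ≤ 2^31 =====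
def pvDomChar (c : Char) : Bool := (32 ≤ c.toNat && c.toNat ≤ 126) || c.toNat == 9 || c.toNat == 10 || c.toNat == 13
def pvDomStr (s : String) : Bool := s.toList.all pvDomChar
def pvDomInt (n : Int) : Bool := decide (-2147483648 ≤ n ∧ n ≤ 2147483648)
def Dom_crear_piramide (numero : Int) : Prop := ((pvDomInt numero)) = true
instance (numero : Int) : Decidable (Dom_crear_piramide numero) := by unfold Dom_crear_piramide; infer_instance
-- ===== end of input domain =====

-- B replaces A's duplicated even/odd accumulator loops by precomputing the number list and
-- building each line independently from a reversed prefix (objective: simpler decomposition).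

-- ===== PORT A =====
def crear_piramide (numero : Int) : String :=
  let resto := PySem.Int.mod numero 2
  let step : String × String → Int → String × String :=
    fun acc i =>
      let secuencia := PySem.Int.toStr i ++ " " ++ acc.2
      (acc.1 ++ secuencia ++ "\n", secuencia)
  let r :=
    if resto == 0 then
      (PySem.List.pyRange 0 (numero + 1) 2).foldl step ("", "")
    else
      (PySem.List.pyRange 1 (numero + 1) 2).foldl step ("", "")
  r.1

-- ===== PORT B =====
def crear_piramide_alt (numero : Int) : String :=
  let inicio : Int := if PySem.Int.mod numero 2 == 0 then 0 else 1
  let numeros := PySem.List.pyRange inicio (numero + 1) 2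
  let lines :=
    (PySem.List.pyRange 1 ((numeros.length : Int) + 1) 1).map
      (fun k => String.join (((numeros.take k.toNat).reverse).map
        (fun x => PySem.Int.toStr x ++ " ")))
  String.join (lines.map (fun line => line ++ "\n"))

-- ===== PRECONDITION & SPEC =====
def Spec_crear_piramide (numero : Int) (out : String) : Prop := out = crear_piramide_alt numero
instance (numero : Int) (out : String) : Decidable (Spec_crear_piramide numero out) := by unfold Spec_crear_piramide; infer_instance

-- ===== CLAIM (what is proved, stated in full; the proofs are below) =====
def Claim_equal_crear_piramide : Prop := ∀ (numero : Int), Dom_crear_piramide numero → Spec_crear_piramide numero (crear_piramide numero)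

-- ===== LEMMAS AND PROOFS =====

def pvItem (i : Int) : List Char := PySem.Int.toChars i ++ [' ']

def pvRev (L : List Int) : List Char := (L.reverse.map pvItem).flatten

def pvF (L : List Int) (s : List Char) : List Char :=
  ((List.range L.length).map (fun j => pvRev (L.take (j + 1)) ++ s ++ ['\n'])).flatten

lemma pvRev_cons (a : Int) (t : List Int) : pvRev (a :: t) = pvRev t ++ pvItem a := by
  simp [pvRev]

lemma pvF_cons (a : Int) (t : List Int) (s : List Char) :
    pvF (a :: t) s = (pvItem a ++ s ++ ['\n']) ++ pvF t (pvItem a ++ s) := by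
  simp only [pvF, List.length_cons, List.range_succ_eq_map, List.map_cons, List.map_map,
    List.flatten_cons]
  congr 1
  · simp [pvRev, pvItem]
  · congr 1
    refine List.map_congr_left fun j _ => ?_
    simp [Function.comp, List.take_succ_cons, pvRev_cons, pvItem]

lemma pvFoldS (L : List Int) (p s : String) :
    L.foldl (fun acc i =>
        (acc.1 ++ (PySem.Int.toStr i ++ " " ++ acc.2) ++ "\n",
         PySem.Int.toStr i ++ " " ++ acc.2)) (p, s)
      = (String.ofList (p.toList ++ pvF L s.toList),
         String.ofList (pvRev L ++ s.toList)) := by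
  induction L generalizing p s with
  | nil => simp [pvF, pvRev]
  | cons a t ih =>
    simp only [List.foldl_cons]
    rw [ih]
    rw [pvF_cons, pvRev_cons]
    have h1 : (" " : String).toList = [' '] := rfl
    have h2 : ("\n" : String).toList = ['\n'] := rfl
    simp [String.toList_append, PySem.Int.toList_toStr, pvItem, h1, h2, List.append_assoc]

lemma pvB_eq (L : List Int) :
    (String.join (((PySem.List.pyRange 1 ((L.length : Int) + 1) 1).map
        (fun k => String.join (((L.take k.toNat).reverse).map
          (fun x => PySem.Int.toStr x ++ " ")))).map
      (fun line => line ++ "\n"))).toList = pvF L [] := by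
  rw [PySem.List.pyRange_one]
  have h : ((L.length : Int) + 1 - 1).toNat = L.length := by omega
  rw [h]
  simp only [String.toList_join, List.map_map, pvF]
  congr 1
  refine List.map_congr_left fun j _ => ?_
  have hj : ((1 : Int) + (j : Int)).toNat = j + 1 := by omega
  have hfun : (String.toList ∘ fun x : Int => PySem.Int.toStr x ++ " ") = pvItem := by
    funext x
    simp [pvItem, String.toList_append, PySem.Int.toList_toStr]
  simp only [Function.comp, hj, String.toList_append, String.toList_join, List.map_map,
    pvRev, List.map_take, List.map_reverse, List.append_nil]
  rw [show (String.toList ∘ fun x : Int => PySem.Int.toStr x ++ " ") = pvItem from hfun]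
  rfl

-- ===== VERDICT (by name: the statement is the Claim_ definition above) =====
theorem crear_piramide_spec : Claim_equal_crear_piramide := by
  intro numero _
  unfold Spec_crear_piramide crear_piramide crear_piramide_alt
  by_cases h : PySem.Int.mod numero 2 = 0 <;>
    simp only [h, beq_iff_eq, reduceIte, beq_self_eq_true] <;>
    · rw [pvFoldS]
      refine String.toList_inj.mp ?_
      rw [pvB_eq]
      simp
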